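-- pv_equiv track=rewrite | github.com/darrencheng0817/AlgorithmLearning | USACO/section1/ariprog/ariprog.py | airgrog
-- ===== SOURCE A (Python) =====
-- def airgrog(N,M):
--     bisquares=set()
--     max_bis=0
--     for i in range(M+1):
--         for j in range(i,M+1):
--             bis=i*i+j*j
--             max_bis=max(max_bis,bis)
--             bisquares.add(bis)
--     res=[]
--     for b in range(1,max_bis//(N-1)+1):
--         for a in range(max_bis-N):
--             if a+b*(N-1)>max_bis:
--                 break
--             isOk=True
--             for i in range(N):
--                 if a+i*b not in bisquares:
--                     isOk=False
--                     break
--             if isOk: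
--                 res.append((a,b))
--     return res
-- ===== SOURCE B (Python) =====
-- def airgrog(N, M):
--     bset = {i * i + j * j for i in range(M + 1) for j in range(i, M + 1)}
--     max_bis = 2 * M * M if M >= 0 else 0
--     vals = sorted(bset)
--     bmax = max_bis // (N - 1)
--     res = []
--     for a in vals:
--         for c in vals:
--             b = c - a
--             if b > bmax:
--                 break
--             if b >= 1 and all(a + i * b in bset for i in range(2, N)):
--                 res.append((a, b))
--     res.sort(key=lambda p: (p[1], p[0]))
--     return res
-- ===== Notes on version B (the rewrite author's own statement) =====
-- stated objective: alternative
-- what changed: B replaces A's double scan over every step b and every integer start a (testing all N terms each time) by enumerating pairs of distinct bisquares taken from the sorted distinct-value list -- the pair gives start a and step c-a directly, only terms 2..N-1 are still tested -- and then sorting the surviving (a,b) pairs by (b,a) to obtain A's emission order.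
-- intended difference: On the degenerate inputs with M=1 and N=2 or N=3 a valid progression starts at a >= max_bis-N, where A's a-loop bound range(max_bis-N) cuts it off so A wrongly returns the empty list (e.g. [] at the witness (2,1)), while B returns every valid progression, which is the intended answer. — e.g. on airgrog(2, 1): A returns [], B returns [(0, 1), (1, 1), (0, 2)]
import Mathlib
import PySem

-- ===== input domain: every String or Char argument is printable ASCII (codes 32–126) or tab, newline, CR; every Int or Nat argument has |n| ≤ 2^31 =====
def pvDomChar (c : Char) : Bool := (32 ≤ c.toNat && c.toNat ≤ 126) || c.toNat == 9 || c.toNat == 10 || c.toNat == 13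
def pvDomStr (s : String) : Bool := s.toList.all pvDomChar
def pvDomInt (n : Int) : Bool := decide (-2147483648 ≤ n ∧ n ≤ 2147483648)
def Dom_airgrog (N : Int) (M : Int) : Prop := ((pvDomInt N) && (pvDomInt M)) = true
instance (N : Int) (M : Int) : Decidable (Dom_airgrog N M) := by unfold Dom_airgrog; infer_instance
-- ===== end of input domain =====

-- B drops A's start/step scan entirely: it enumerates PAIRS of distinct bisquares (start a, step
-- c - a), verifies the remaining terms against the set, and sorts the survivors by (step, start);
-- equivalence is about return values (neither version mutates its arguments).

-- ===== PORT A =====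
-- inner 'for a in range(max_bis-N): if a+b*(N-1)>max_bis: break; …' loop of A (early exit = return)
def airgrogLoopA (S : PySem.Set Int) (mb N b : Int) : List Int → List (Int × Int)
  | [] => []
  | a :: t =>
    if a + b * (N - 1) > mb then []
    else if (PySem.List.pyRange 0 N 1).all (fun i => PySem.Set.contains S (a + i * b)) then
      (a, b) :: airgrogLoopA S mb N b t
    else airgrogLoopA S mb N b t

def airgrog (N : Int) (M : Int) : List (Int × Int) :=
  let st :=
    (PySem.List.pyRange 0 (M + 1) 1).foldl (fun st i =>
      (PySem.List.pyRange i (M + 1) 1).foldl (fun st j =>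
        (PySem.Set.add st.1 (i * i + j * j), max st.2 (i * i + j * j))) st)
      (PySem.Set.empty, 0)
  let bisquares := st.1
  let max_bis := st.2
  (PySem.List.pyRange 1 (PySem.Int.floordiv max_bis (N - 1) + 1) 1).foldl (fun res b =>
    res ++ airgrogLoopA bisquares max_bis N b (PySem.List.pyRange 0 (max_bis - N) 1)) []

-- ===== PORT B =====
-- inner 'for c in vals: b=c-a; if b>bmax: break; …' loop of B (early exit = break)
def airgrogLoopB (S : PySem.Set Int) (bmax N a : Int) : List Int → List (Int × Int)
  | [] => []
  | c :: t =>
    if c - a > bmax then []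
    else if decide (1 ≤ c - a) &&
        (PySem.List.pyRange 2 N 1).all (fun i => PySem.Set.contains S (a + i * (c - a))) then
      (a, c - a) :: airgrogLoopB S bmax N a t
    else airgrogLoopB S bmax N a t

def airgrog_alt (N : Int) (M : Int) : List (Int × Int) :=
  let bset : PySem.Set Int :=
    PySem.Set.ofList ((PySem.List.pyRange 0 (M + 1) 1).flatMap (fun i =>
      (PySem.List.pyRange i (M + 1) 1).map (fun j => i * i + j * j)))
  let max_bis : Int := if 0 ≤ M then 2 * M * M else 0
  let vals := PySem.List.sorted bset (fun x => x) false
  let bmax := PySem.Int.floordiv max_bis (N - 1)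
  let res := vals.foldl (fun res a => res ++ airgrogLoopB bset bmax N a vals) []
  PySem.List.sorted2 res (fun p => p.2) (fun p => p.1) false

-- ===== PRECONDITION & SPEC =====
-- Pre_ excludes exactly N = 1, where both Pythons raise ZeroDivisionError on max_bis//(N-1).
def Pre_airgrog (N : Int) (M : Int) : Prop := N ≠ 1
instance (N : Int) (M : Int) : Decidable (Pre_airgrog N M) := by unfold Pre_airgrog; infer_instance
def pvWitness_airgrog : Int × Int := (3, 2)

-- On the degenerate inputs with M = 1 and N = 2 or N = 3 — the only inputs where a valid N-term
-- progression of bisquares starts at a ≥ max_bis - N — A's a-loop bound range(max_bis-N) cuts it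
-- off and A wrongly returns the empty list, while B returns every valid progression, which is
-- the intended answer.
def D_airgrog (N : Int) (M : Int) : Prop := M = 1 ∧ (N = 2 ∨ N = 3)
instance (N : Int) (M : Int) : Decidable (D_airgrog N M) := by unfold D_airgrog; infer_instance

def Spec_airgrog (N : Int) (M : Int) (out : List (Int × Int)) : Prop :=
  ¬ D_airgrog N M → out = airgrog_alt N M
instance (N : Int) (M : Int) (out : List (Int × Int)) : Decidable (Spec_airgrog N M out) := by
  unfold Spec_airgrog; infer_instance

def pvDiffWitness_airgrog : Int × Int := (2, 1)
def pvDiffWitnessOut_airgrog : (List (Int × Int)) × (List (Int × Int)) :=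
  ([], [(0, 1), (1, 1), (0, 2)])

-- ===== CLAIM (what is proved, stated in full; the proofs are below) =====
def Claim_unchanged_airgrog : Prop :=
  ∀ (N : Int) (M : Int), Dom_airgrog N M → Pre_airgrog N M → Spec_airgrog N M (airgrog N M)
def Claim_changed_airgrog : Prop :=
  Dom_airgrog (pvDiffWitness_airgrog.1) (pvDiffWitness_airgrog.2) ∧
  Pre_airgrog (pvDiffWitness_airgrog.1) (pvDiffWitness_airgrog.2) ∧
  D_airgrog (pvDiffWitness_airgrog.1) (pvDiffWitness_airgrog.2) ∧
  airgrog (pvDiffWitness_airgrog.1) (pvDiffWitness_airgrog.2) = pvDiffWitnessOut_airgrog.1 ∧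
  airgrog_alt (pvDiffWitness_airgrog.1) (pvDiffWitness_airgrog.2) = pvDiffWitnessOut_airgrog.2 ∧
  pvDiffWitnessOut_airgrog.1 ≠ pvDiffWitnessOut_airgrog.2
def Claim_exact_airgrog : Prop :=
  ∀ (N : Int) (M : Int), Dom_airgrog N M → Pre_airgrog N M → D_airgrog N M →
    airgrog N M ≠ airgrog_alt N M

-- ===== LEMMAS AND PROOFS =====

-- all (i,j)-bisquare values, in generation order
def pvGen (M : Int) : List Int :=
  (PySem.List.pyRange 0 (M + 1) 1).flatMap (fun i =>
    (PySem.List.pyRange i (M + 1) 1).map (fun j => i * i + j * j))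

def pvMb (M : Int) : Int := if 0 ≤ M then 2 * M * M else 0

def pvS (M : Int) : PySem.Set Int := PySem.Set.ofList (pvGen M)

def pvVals (M : Int) : List Int := PySem.List.sorted (pvS M) (fun x => x) false

def pvBmax (N M : Int) : Int := PySem.Int.floordiv (pvMb M) (N - 1)

def pvBrange (N M : Int) : List Int := PySem.List.pyRange 1 (pvBmax N M + 1) 1

def pvPA (M N b a : Int) : Bool :=
  decide (a + b * (N - 1) ≤ pvMb M) &&
    (PySem.List.pyRange 0 N 1).all (fun i => PySem.Set.contains (pvS M) (a + i * b))

def pvPB (M N b a : Int) : Bool :=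
  decide (a + b * (N - 1) ≤ pvMb M) &&
    (PySem.List.pyRange 1 N 1).all (fun i => PySem.Set.contains (pvS M) (a + i * b))

def pvQ (M N b a : Int) : Bool := PySem.Set.contains (pvS M) a && pvPB M N b a

-- A's list before any reasoning: blocks indexed by the step b
def pvLA (N M : Int) : List (Int × Int) :=
  (pvBrange N M).flatMap (fun b =>
    ((PySem.List.pyRange 0 (pvMb M - N) 1).filter (pvPA M N b)).map (fun a => (a, b)))

-- B's pair condition and pair list before the final sort
def pvCond (N M a c : Int) : Bool :=
  decide (1 ≤ c - a) && decide (c - a ≤ pvBmax N M) &&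
    (PySem.List.pyRange 2 N 1).all (fun i => PySem.Set.contains (pvS M) (a + i * (c - a)))

def pvResB (N M : Int) : List (Int × Int) :=
  (pvVals M).flatMap (fun a =>
    ((pvVals M).filter (pvCond N M a)).map (fun c => (a, c - a)))

-- the lexicographic (step, start) orders used by B's final sort
def pvLexLt (p q : Int × Int) : Prop := p.2 < q.2 ∨ (p.2 = q.2 ∧ p.1 < q.1)
def pvLexLe (p q : Int × Int) : Prop := p.2 < q.2 ∨ (p.2 = q.2 ∧ p.1 ≤ q.1)

def pvBef (p q : Int × Int) : Bool :=
  decide (p.2 < q.2) || (!decide (q.2 < p.2) && decide (p.1 < q.1))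

theorem pvGen_mem (M x : Int) :
    x ∈ pvGen M ↔ ∃ i j : Int, 0 ≤ i ∧ i ≤ j ∧ j ≤ M ∧ x = i * i + j * j := by
  simp only [pvGen, List.mem_flatMap, List.mem_map, PySem.List.mem_pyRange_one]
  constructor
  · rintro ⟨i, ⟨hi0, hi1⟩, j, ⟨hj0, hj1⟩, rfl⟩
    exact ⟨i, j, hi0, hj0, by omega, rfl⟩
  · rintro ⟨i, j, hi0, hij, hjM, rfl⟩
    exact ⟨i, ⟨hi0, by omega⟩, j, ⟨hij, by omega⟩, rfl⟩

theorem pvGen_le (M x : Int) (hx : x ∈ pvGen M) : 0 ≤ x ∧ x ≤ pvMb M := by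
  rw [pvGen_mem] at hx
  obtain ⟨i, j, hi0, hij, hjM, rfl⟩ := hx
  have h0 : 0 ≤ M := by omega
  have h1 : i * i ≤ M * M := by nlinarith
  have h2 : j * j ≤ M * M := by nlinarith
  constructor
  · nlinarith
  · simp only [pvMb, if_pos h0]; nlinarith

theorem pvMb_nonneg (M : Int) : 0 ≤ pvMb M := by
  simp only [pvMb]; split_ifs with h
  · nlinarith
  · omega

-- A's set/max building loop computes (set(pvGen M), foldl max 0 (pvGen M))
theorem pvBuild_eq (M : Int) :
    ((PySem.List.pyRange 0 (M + 1) 1).foldl (fun st i =>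
      (PySem.List.pyRange i (M + 1) 1).foldl (fun st j =>
        (PySem.Set.add st.1 (i * i + j * j), max st.2 (i * i + j * j))) st)
      (PySem.Set.empty, 0)) =
    (pvS M, (pvGen M).foldl max 0) := by
  have h1 : ∀ (st : PySem.Set Int × Int) (i : Int),
      (PySem.List.pyRange i (M + 1) 1).foldl (fun st j =>
        (PySem.Set.add st.1 (i * i + j * j), max st.2 (i * i + j * j))) st =
      ((PySem.List.pyRange i (M + 1) 1).map (fun j => i * i + j * j)).foldl
        (fun st x => (PySem.Set.add st.1 x, max st.2 x)) st := by
    intro st i; rw [List.foldl_map]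
  simp only [h1]
  rw [← List.foldl_flatMap, ← pvGen]
  rw [PySem.List.foldl_prod_mk (f := fun s x => PySem.Set.add s x) (g := fun m x => max m x)]
  rfl

theorem pvFoldMax_eq (M : Int) : (pvGen M).foldl max 0 = pvMb M := by
  by_cases h0 : 0 ≤ M
  · have hmem : pvMb M ∈ pvGen M := by
      rw [pvGen_mem]
      refine ⟨M, M, h0, le_refl _, le_refl _, ?_⟩
      simp only [pvMb, if_pos h0]; ring
    have hub := (PySem.List.le_foldl_max (pvGen M) 0).2 _ hmem
    rcases PySem.List.foldl_max_mem (pvGen M) 0 with hv | hv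
    · rw [hv]; rw [hv] at hub
      have := pvMb_nonneg M; omega
    · have := (pvGen_le M _ hv).2; omega
  · have hnil : pvGen M = [] := by
      simp [pvGen, PySem.List.pyRange_one_eq_nil (show M + 1 ≤ 0 by omega)]
    rw [hnil]
    simp [pvMb, h0]

-- A's break-loop over an ascending list is a filter
theorem pvLoopA_eq (S : PySem.Set Int) (mb N b : Int) (l : List Int)
    (h : l.Pairwise (· ≤ ·)) :
    airgrogLoopA S mb N b l =
      (l.filter (fun a => decide (a + b * (N - 1) ≤ mb) &&
        (PySem.List.pyRange 0 N 1).all (fun i => PySem.Set.contains S (a + i * b)))).map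
        (fun a => (a, b)) := by
  induction l with
  | nil => rfl
  | cons a t ih =>
    rw [List.pairwise_cons] at h
    rw [airgrogLoopA]
    by_cases hstop : a + b * (N - 1) > mb
    · rw [if_pos hstop]
      have hnil : (a :: t).filter (fun x => decide (x + b * (N - 1) ≤ mb) &&
          (PySem.List.pyRange 0 N 1).all (fun i => PySem.Set.contains S (x + i * b))) = [] := by
        rw [List.filter_eq_nil_iff]
        intro x hx
        have hax : a ≤ x := by
          rcases List.mem_cons.mp hx with rfl | hx
          · exact le_refl x
          · exact h.1 x hx
        simp only [Bool.and_eq_true, decide_eq_true_eq, not_and]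
        intro h'
        omega
      rw [hnil]; rfl
    · rw [if_neg hstop]
      have hle : a + b * (N - 1) ≤ mb := by omega
      rw [List.filter_cons]
      by_cases hall : (PySem.List.pyRange 0 N 1).all (fun i => PySem.Set.contains S (a + i * b)) = true
      · rw [if_pos hall]
        rw [if_pos (by rw [Bool.and_eq_true]; exact ⟨decide_eq_true hle, hall⟩)]
        rw [List.map_cons]
        exact congrArg (List.cons _) (ih h.2)
      · rw [if_neg hall]
        rw [if_neg (by rw [Bool.and_eq_true, not_and]; exact fun _ => hall)]
        exact ih h.2

-- representation of port A
theorem pvRepA (N M : Int) : airgrog N M = pvLA N M := by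
  have hloop : ∀ bb : Int,
      airgrogLoopA (pvS M) (pvMb M) N bb (PySem.List.pyRange 0 (pvMb M - N) 1) =
      ((PySem.List.pyRange 0 (pvMb M - N) 1).filter (pvPA M N bb)).map (fun a => (a, bb)) := by
    intro bb
    rw [pvLoopA_eq _ _ _ _ _ ((PySem.List.pairwise_lt_pyRange_one _ _).imp le_of_lt)]
    rfl
  simp only [airgrog]
  rw [pvBuild_eq, pvFoldMax_eq]
  rw [PySem.List.foldl_append_eq_flatMap
    (g := fun b => airgrogLoopA (pvS M) (pvMb M) N b (PySem.List.pyRange 0 (pvMb M - N) 1))]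
  rw [List.nil_append]
  simp only [pvLA, pvBrange, pvBmax, hloop]

-- membership in sorted(bisquares) is membership in the bisquare list
theorem pvVals_mem (M x : Int) : x ∈ pvVals M ↔ x ∈ pvGen M := by
  rw [pvVals, PySem.List.mem_sorted, pvS]
  exact PySem.Set.mem_ofList _ _

theorem pvVals_pairwise (M : Int) : (pvVals M).Pairwise (· < ·) :=
  PySem.List.sorted_ofList_pairwise_lt (pvGen M)

-- B's break-loop over an ascending list is a filter
theorem pvLoopB_eq (N M a : Int) (l : List Int) (h : l.Pairwise (· ≤ ·)) :
    airgrogLoopB (pvS M) (pvBmax N M) N a l =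
      (l.filter (pvCond N M a)).map (fun c => (a, c - a)) := by
  induction l with
  | nil => rfl
  | cons c t ih =>
    rw [List.pairwise_cons] at h
    rw [airgrogLoopB]
    by_cases hstop : c - a > pvBmax N M
    · rw [if_pos hstop]
      have hnil : (c :: t).filter (pvCond N M a) = [] := by
        rw [List.filter_eq_nil_iff]
        intro x hx
        have hcx : c ≤ x := by
          rcases List.mem_cons.mp hx with rfl | hx
          · exact le_refl x
          · exact h.1 x hx
        simp only [pvCond, Bool.and_eq_true, decide_eq_true_eq]
        rintro ⟨⟨-, h2⟩, -⟩
        omega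
      rw [hnil]; rfl
    · rw [if_neg hstop]
      rw [List.filter_cons]
      have hcond : pvCond N M a c =
          (decide (1 ≤ c - a) &&
            (PySem.List.pyRange 2 N 1).all (fun i => PySem.Set.contains (pvS M) (a + i * (c - a)))) := by
        have h1 : decide (c - a ≤ pvBmax N M) = true := by simp; omega
        rw [pvCond, h1, Bool.and_true]
      by_cases hok : (decide (1 ≤ c - a) &&
          (PySem.List.pyRange 2 N 1).all (fun i => PySem.Set.contains (pvS M) (a + i * (c - a)))) = true
      · rw [if_pos hok, hcond, if_pos hok, List.map_cons]
        exact congrArg (List.cons _) (ih h.2)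
      · rw [if_neg hok, hcond, if_neg hok]
        exact ih h.2

-- representation of port B
theorem pvRepB (N M : Int) :
    airgrog_alt N M = PySem.List.sorted2 (pvResB N M) (fun p => p.2) (fun p => p.1) false := by
  have hrfl : airgrog_alt N M = PySem.List.sorted2
      ((pvVals M).foldl (fun res a => res ++ airgrogLoopB (pvS M) (pvBmax N M) N a (pvVals M)) [])
      (fun p => p.2) (fun p => p.1) false := rfl
  rw [hrfl]
  rw [PySem.List.foldl_append_eq_flatMap
    (g := fun a => airgrogLoopB (pvS M) (pvBmax N M) N a (pvVals M))]
  rw [List.nil_append]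
  have hloop : ∀ a : Int,
      airgrogLoopB (pvS M) (pvBmax N M) N a (pvVals M) =
        ((pvVals M).filter (pvCond N M a)).map (fun c => (a, c - a)) := fun a =>
    pvLoopB_eq N M a (pvVals M) ((pvVals_pairwise M).imp le_of_lt)
  simp only [hloop, pvResB]

-- N ≥ 2 whenever the b-range is nonempty (and N ≠ 1)
theorem pvN2 (N M b : Int) (hpre : N ≠ 1) (hb : b ∈ pvBrange N M) : 2 ≤ N := by
  rw [pvBrange, PySem.List.mem_pyRange_one] at hb
  by_contra hN
  have hneg : N - 1 < 0 := by omega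
  have hfd : PySem.Int.floordiv (pvMb M) (N - 1) ≤ 0 := by
    have h := PySem.Int.floordiv_mul_add_mod (pvMb M) (N - 1)
    have h2 := PySem.Int.mod_neg_bounds (pvMb M) hneg
    nlinarith [pvMb_nonneg M, h, h2.1, h2.2]
  simp only [pvBmax] at hb
  omega

theorem pvB_le (N M b : Int) (hN : 2 ≤ N) (hb : b ∈ pvBrange N M) : 1 ≤ b ∧ b ≤ pvMb M := by
  rw [pvBrange, PySem.List.mem_pyRange_one] at hb
  have hpos : (0 : Int) < N - 1 := by omega
  have := PySem.Int.floordiv_eq_ediv_of_pos (a := pvMb M) hpos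
  have h2 := Int.ediv_le_self (N - 1) (pvMb_nonneg M)
  simp only [pvBmax] at hb
  omega

-- pvPA and pvQ agree (for N ≥ 1: the i = 0 test is the membership test)
theorem pvPA_eq_pvQ (M N b a : Int) (hN : 1 ≤ N) : pvPA M N b a = pvQ M N b a := by
  rw [pvPA, pvQ, pvPB]
  rw [PySem.List.pyRange_one_cons (by omega : (0 : Int) < N)]
  simp only [List.all_cons, zero_mul, add_zero]
  exact Bool.and_left_comm _ _ _

-- no square is ≡ 3 (mod 4), so no bisquare is either
theorem pvSq_mod4 (i : Int) : i * i % 4 = 0 ∨ i * i % 4 = 1 := by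
  rcases Int.even_or_odd i with ⟨k, rfl⟩ | ⟨k, rfl⟩
  · have h : (k + k) * (k + k) = 4 * (k * k) := by ring
    omega
  · have h : (2 * k + 1) * (2 * k + 1) = 4 * (k * k + k) + 1 := by ring
    omega

theorem pvGen_mod4 (M x : Int) (hx : x ∈ pvGen M) : x % 4 ≠ 3 := by
  rw [pvGen_mem] at hx
  obtain ⟨i, j, -, -, -, rfl⟩ := hx
  have h1 := pvSq_mod4 i
  have h2 := pvSq_mod4 j
  omega

-- the gap at the top: for M ≥ 2 the only bisquare above M² + (M-1)² is 2M²
theorem pvGen_top (M x : Int) (hM : 2 ≤ M) (hx : x ∈ pvGen M)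
    (hbig : M * M + (M - 1) * (M - 1) < x) : x = 2 * M * M := by
  rw [pvGen_mem] at hx
  obtain ⟨i, j, hi0, hij, hjM, rfl⟩ := hx
  have hj : j = M := by
    by_contra h
    have hj1 : j ≤ M - 1 := by omega
    nlinarith
  have hi : i = M := by
    by_contra h
    have hi1 : i ≤ M - 1 := by omega
    rw [hj] at hbig
    nlinarith
  rw [hi, hj]; ring

-- from ¬D: no progression survives with start a ≥ mb - N
theorem pvQ_false (N M b a : Int) (hN : 2 ≤ N) (hb1 : 1 ≤ b) (hb2 : b ≤ pvMb M)
    (hnd : ¬ D_airgrog N M) (ha : pvMb M - N ≤ a) : pvQ M N b a = false := by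
  by_contra hq
  rw [Bool.not_eq_false, pvQ, pvPB, Bool.and_eq_true, Bool.and_eq_true] at hq
  obtain ⟨hmem, hle, hallb⟩ := hq
  rw [PySem.Set.contains_iff, pvS, PySem.Set.mem_ofList] at hmem
  rw [decide_eq_true_eq] at hle
  rw [List.all_eq_true] at hallb
  have hall : ∀ i : Int, 1 ≤ i → i < N → a + i * b ∈ pvGen M := by
    intro i h1 h2
    have := hallb i (by rw [PySem.List.mem_pyRange_one]; exact ⟨h1, h2⟩)
    rwa [PySem.Set.contains_iff, pvS, PySem.Set.mem_ofList] at this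
  have hM : 0 ≤ M := by
    rcases (pvGen_mem M a).mp hmem with ⟨i, j, hi0, hij, hjM, -⟩
    omega
  have hmb : pvMb M = 2 * M * M := by simp [pvMb, hM]
  have habd := pvGen_le M a hmem
  rw [hmb] at habd hle ha hb2
  have hab : a + b ∈ pvGen M := by
    have := hall 1 (le_refl _) (by omega)
    rwa [one_mul] at this
  have habbd := pvGen_le M (a + b) hab
  rw [hmb] at habbd
  have hbb : b * (N - 1) ≤ N := by omega
  have hbsplit : b * (N - 1) = b * (N - 2) + b := by ring
  have hbnn : 0 ≤ b * (N - 2) := mul_nonneg (by omega) (by omega)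
  by_cases hM2 : M < 2
  · rcases (show M = 0 ∨ M = 1 by omega) with rfl | rfl
    · omega
    · have hNb : 1 * (N - 1) ≤ b * (N - 1) :=
        mul_le_mul_of_nonneg_right hb1 (by omega)
      exact hnd ⟨rfl, by omega⟩
  · have hM2' : 2 ≤ M := by omega
    have hexp : 2 * M * M = M * M + M * M := by ring
    have hexp2 : (M - 1) * (M - 1) = M * M - 2 * M + 1 := by ring
    have htopa : ¬ (M * M + (M - 1) * (M - 1) < a) := by
      intro hbig
      have := pvGen_top M a hM2' hmem hbig
      omega
    have hN3 : 3 ≤ N := by omega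
    have hb1' : b = 1 := by
      by_contra hb2'
      have h2b : 2 ≤ b := by omega
      have : 2 * (N - 1) ≤ b * (N - 1) :=
        mul_le_mul_of_nonneg_right h2b (by omega)
      omega
    subst hb1'
    have h1 : a + 1 ∈ pvGen M := by
      have := hall 1 (by omega) (by omega); rwa [one_mul] at this
    have h2 : a + 2 ∈ pvGen M := by
      have := hall 2 (by omega) (by omega)
      rwa [show a + 2 * 1 = a + 2 by ring] at this
    by_cases hN4 : N < 4
    · have hMeq : M = 2 := by omega
      subst hMeq
      have ha5 : a = 5 := by omega
      subst ha5
      exact absurd h1 (by decide)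
    · have h3 : a + 3 ∈ pvGen M := by
        have := hall 3 (by omega) (by omega)
        rwa [show a + 3 * 1 = a + 3 by ring] at this
      have m0 := pvGen_mod4 M a hmem
      have m1 := pvGen_mod4 M (a + 1) h1
      have m2 := pvGen_mod4 M (a + 2) h2
      have m3 := pvGen_mod4 M (a + 3) h3
      omega

-- membership in A's list
theorem pvLA_mem (N M x y : Int) :
    (x, y) ∈ pvLA N M ↔
      y ∈ pvBrange N M ∧ x ∈ PySem.List.pyRange 0 (pvMb M - N) 1 ∧ pvPA M N y x = true := by
  simp only [pvLA, List.mem_flatMap, List.mem_map, List.mem_filter, Prod.mk.injEq]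
  constructor
  · rintro ⟨b, hb, a, ⟨ha, hp⟩, rfl, rfl⟩
    exact ⟨hb, ha, hp⟩
  · rintro ⟨hy, hx, hp⟩
    exact ⟨y, hy, x, ⟨hx, hp⟩, rfl, rfl⟩

-- membership in B's unsorted pair list
theorem pvResB_mem (N M x y : Int) :
    (x, y) ∈ pvResB N M ↔
      x ∈ pvVals M ∧ x + y ∈ pvVals M ∧ pvCond N M x (x + y) = true := by
  simp only [pvResB, List.mem_flatMap, List.mem_map, List.mem_filter, Prod.mk.injEq]
  constructor
  · rintro ⟨a, ha, c, ⟨hc, hcond⟩, rfl, rfl⟩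
    rw [show a + (c - a) = c by ring]
    exact ⟨ha, hc, hcond⟩
  · rintro ⟨hx, hc, hcond⟩
    exact ⟨x, hx, x + y, ⟨hc, hcond⟩, rfl, by ring⟩

-- the two membership conditions agree outside D (given N ≠ 1)
theorem pvMem_iff (N M : Int) (hpre : N ≠ 1) (hnd : ¬ D_airgrog N M) (p : Int × Int) :
    p ∈ pvLA N M ↔ p ∈ pvResB N M := by
  obtain ⟨x, y⟩ := p
  rw [pvLA_mem, pvResB_mem]
  constructor
  · rintro ⟨hy, hx, hp⟩
    have hN := pvN2 N M y hpre hy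
    rw [pvPA_eq_pvQ M N y x (by omega), pvQ, Bool.and_eq_true, pvPB, Bool.and_eq_true] at hp
    obtain ⟨hmem, hle, hall⟩ := hp
    rw [List.all_eq_true] at hall
    have hterm : ∀ i : Int, 1 ≤ i → i < N → PySem.Set.contains (pvS M) (x + i * y) = true := by
      intro i h1 h2
      exact hall i (by rw [PySem.List.mem_pyRange_one]; exact ⟨h1, h2⟩)
    rw [pvBrange, PySem.List.mem_pyRange_one] at hy
    refine ⟨?_, ?_, ?_⟩
    · rw [pvVals_mem]
      rwa [PySem.Set.contains_iff, pvS, PySem.Set.mem_ofList] at hmem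
    · rw [pvVals_mem]
      have := hterm 1 le_rfl (by omega)
      rw [PySem.Set.contains_iff, pvS, PySem.Set.mem_ofList] at this
      rwa [one_mul] at this
    · rw [pvCond, Bool.and_eq_true, Bool.and_eq_true]
      refine ⟨⟨by simp; omega, by simp; omega⟩, ?_⟩
      rw [List.all_eq_true]
      intro i hi
      rw [PySem.List.mem_pyRange_one] at hi
      rw [show x + i * (x + y - x) = x + i * y by ring]
      exact hterm i (by omega) hi.2
  · rintro ⟨hx, hc, hcond⟩
    rw [pvCond, Bool.and_eq_true, Bool.and_eq_true] at hcond
    obtain ⟨⟨hy1, hy2⟩, hall⟩ := hcond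
    rw [decide_eq_true_eq] at hy1 hy2
    rw [List.all_eq_true] at hall
    rw [pvVals_mem] at hx hc
    have hterm2 : ∀ i : Int, 2 ≤ i → i < N → x + i * y ∈ pvGen M := by
      intro i h1 h2
      have := hall i (by rw [PySem.List.mem_pyRange_one]; exact ⟨h1, h2⟩)
      rw [show x + i * (x + y - x) = x + i * y by ring] at this
      rwa [PySem.Set.contains_iff, pvS, PySem.Set.mem_ofList] at this
    have hy : y ∈ pvBrange N M := by
      rw [pvBrange, PySem.List.mem_pyRange_one]
      simp only [show x + y - x = y by ring] at hy1 hy2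
      omega
    have hN := pvN2 N M y hpre hy
    obtain ⟨-, hymb⟩ := pvB_le N M y hN hy
    -- all terms of the progression are bisquares
    have hterm : ∀ i : Int, 1 ≤ i → i < N → x + i * y ∈ pvGen M := by
      intro i h1 h2
      rcases (show i = 1 ∨ 2 ≤ i by omega) with rfl | h2'
      · rwa [one_mul]
      · exact hterm2 i h2' h2
    -- the last term is a bisquare, hence ≤ max_bis
    have hlast : x + y * (N - 1) ≤ pvMb M := by
      have hmem : x + (N - 1) * y ∈ pvGen M := hterm (N - 1) (by omega) (by omega)
      have := (pvGen_le M _ hmem).2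
      have hcomm : y * (N - 1) = (N - 1) * y := mul_comm _ _
      omega
    have hq : pvQ M N y x = true := by
      rw [pvQ, Bool.and_eq_true, pvPB, Bool.and_eq_true]
      refine ⟨by rw [PySem.Set.contains_iff, pvS, PySem.Set.mem_ofList]; exact hx,
        by simp [hlast], ?_⟩
      rw [List.all_eq_true]
      intro i hi
      rw [PySem.List.mem_pyRange_one] at hi
      rw [PySem.Set.contains_iff, pvS, PySem.Set.mem_ofList]
      exact hterm i hi.1 hi.2
    have hx0 := (pvGen_le M x hx).1
    have hxlt : x < pvMb M - N := by
      by_contra hge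
      have := pvQ_false N M y x hN (by simp only [show x + y - x = y by ring] at hy1; omega)
        hymb hnd (by omega)
      rw [hq] at this
      exact absurd this (by simp)
    refine ⟨hy, by rw [PySem.List.mem_pyRange_one]; exact ⟨hx0, hxlt⟩, ?_⟩
    rw [pvPA_eq_pvQ M N y x (by omega)]
    exact hq

-- A's list is strictly increasing in the lexicographic (step, start) order
theorem pvLA_pairwise (N M : Int) : (pvLA N M).Pairwise pvLexLt := by
  rw [pvLA, List.pairwise_flatMap]
  constructor
  · intro b _
    refine List.Pairwise.map _ ?_ ((PySem.List.pairwise_lt_pyRange_one _ _).filter _)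
    intro a1 a2 h
    exact Or.inr ⟨rfl, h⟩
  · refine (PySem.List.pairwise_lt_pyRange_one _ _).imp ?_
    intro b1 b2 hb p hp q hq
    rw [List.mem_map] at hp hq
    obtain ⟨a1, -, rfl⟩ := hp
    obtain ⟨a2, -, rfl⟩ := hq
    exact Or.inl hb

theorem pvLexLt_ne (p q : Int × Int) (h : pvLexLt p q) : p ≠ q := by
  rintro rfl
  rcases h with h | ⟨-, h⟩ <;> omega

theorem pvLA_nodup (N M : Int) : (pvLA N M).Nodup :=
  (pvLA_pairwise N M).imp (fun h => pvLexLt_ne _ _ h)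

-- B's pair list has no duplicates
theorem pvResB_nodup (N M : Int) : (pvResB N M).Nodup := by
  rw [pvResB, List.nodup_iff_pairwise_ne, List.pairwise_flatMap]
  constructor
  · intro a _
    refine List.Pairwise.map _ ?_ ((pvVals_pairwise M).filter _)
    intro c1 c2 h heq
    rw [Prod.mk.injEq] at heq
    omega
  · refine (pvVals_pairwise M).imp ?_
    intro a1 a2 ha p hp q hq
    rw [List.mem_map] at hp hq
    obtain ⟨c1, -, rfl⟩ := hp
    obtain ⟨c2, -, rfl⟩ := hq
    intro heq
    rw [Prod.mk.injEq] at heq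
    omega

-- the comparison sorted2 uses is exactly strict lexicographic (step, start) order
theorem pvBef_iff (p q : Int × Int) : pvBef p q = true ↔ pvLexLt p q := by
  rw [pvBef, pvLexLt]
  simp only [Bool.or_eq_true, Bool.and_eq_true, Bool.not_eq_true', decide_eq_true_eq,
    decide_eq_false_iff_not]
  omega

theorem pvBef_false (p q : Int × Int) (h : pvBef p q = false) : pvLexLe q p := by
  have : ¬ pvLexLt p q := by rw [← pvBef_iff, h]; simp
  rw [pvLexLt] at this
  rw [pvLexLe]
  omega

-- insertion keeps the list ordered under pvLexLe
theorem pvInsertBy_pairwise (x : Int × Int) (l : List (Int × Int))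
    (h : l.Pairwise pvLexLe) : (PySem.List.insertBy pvBef x l).Pairwise pvLexLe := by
  induction l with
  | nil => simp [PySem.List.insertBy]
  | cons y ys ih =>
    rw [List.pairwise_cons] at h
    rw [PySem.List.insertBy]
    by_cases hb : pvBef x y = true
    · rw [if_pos hb]
      have hxy : pvLexLt x y := (pvBef_iff x y).mp hb
      rw [List.pairwise_cons]
      constructor
      · intro z hz
        rcases List.mem_cons.mp hz with rfl | hz
        · rw [pvLexLt] at hxy; rw [pvLexLe]; omega
        · have hyz := h.1 z hz
          rw [pvLexLt] at hxy; rw [pvLexLe] at hyz ⊢; omega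
      · rw [List.pairwise_cons]; exact h
    · rw [if_neg hb]
      rw [List.pairwise_cons]
      refine ⟨?_, ih h.2⟩
      intro z hz
      rcases (PySem.List.mem_insertBy _ _ _ _).mp hz with rfl | hz
      · exact pvBef_false _ _ (Bool.eq_false_iff.mpr hb)
      · exact h.1 z hz

theorem pvFoldlInsert_pairwise (xs : List (Int × Int)) (acc : List (Int × Int))
    (h : acc.Pairwise pvLexLe) :
    (xs.foldl (fun acc x => PySem.List.insertBy pvBef x acc) acc).Pairwise pvLexLe := by
  induction xs generalizing acc with
  | nil => exact h
  | cons x t ih => exact ih _ (pvInsertBy_pairwise x acc h)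

-- the result of B's final sort is ordered under pvLexLe
theorem pvSorted2_pairwise (xs : List (Int × Int)) :
    (PySem.List.sorted2 xs (fun p => p.2) (fun p => p.1) false).Pairwise pvLexLe :=
  pvFoldlInsert_pairwise xs [] (by simp)

-- two pvLexLe-ordered permutations of each other are equal
theorem pvEq_of_perm_sorted (l1 l2 : List (Int × Int)) (hp : l1.Perm l2)
    (h1 : l1.Pairwise pvLexLe) (h2 : l2.Pairwise pvLexLe) : l1 = l2 := by
  refine List.Perm.eq_of_pairwise ?_ h1 h2 hp
  intro a b _ _ hab hba
  rw [pvLexLe] at hab hba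
  exact Prod.ext (by omega) (by omega)

-- ===== VERDICT (by name: the statement is the Claim_ definition above) =====
theorem airgrog_spec : Claim_unchanged_airgrog := by
  intro N M _ hpre hnd
  show airgrog N M = airgrog_alt N M
  rw [pvRepA, pvRepB]
  have hperm : (pvLA N M).Perm (PySem.List.sorted2 (pvResB N M) (fun p => p.2) (fun p => p.1) false) := by
    refine List.Perm.trans ?_ (PySem.List.sorted2_perm _ _ _ _).symm
    rw [List.perm_ext_iff_of_nodup (pvLA_nodup N M) (pvResB_nodup N M)]
    exact pvMem_iff N M hpre hnd
  refine pvEq_of_perm_sorted _ _ hperm ?_ (pvSorted2_pairwise _)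
  refine (pvLA_pairwise N M).imp ?_
  intro p q h
  rw [pvLexLt] at h; rw [pvLexLe]; omega

theorem airgrog_changed : Claim_changed_airgrog := by
  unfold Claim_changed_airgrog; decide

theorem airgrog_tight : Claim_exact_airgrog := by
  intro N M _ _ hd heq
  obtain ⟨hM, hN⟩ := hd
  subst hM
  rcases hN with rfl | rfl
  · exact absurd heq (by decide)
  · exact absurd heq (by decide)
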